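-- pv_equiv track=rewrite | github.com/jt291/algorithmique | tex/controles/corriges/questionnements/q-ds.py | Taquin
-- ===== SOURCE A (Python) =====
-- def listeCarree(t) :
--     """
--     ok = listeCarree(t)
--     True si t est une liste de n listes de n éléments
--     chacune , False sinon .
--     >>> listeCarree ([])
--     True
--     >>> listeCarree ([[1]])
--     True
--     >>> listeCarree ([[1] ,[2]])
--     False
--     >>> listeCarree ([[1 ,7] ,[2 , -3]])
--     True
--     >>> listeCarree ([[2 ,1 ,8] ,[6 ,0 ,3]])
--     False
--     >>> listeCarree ([[2 ,1 ,8] ,[6 ,0 ,3] ,[7 ,5 ,4]])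
--     True
--     >>> listeCarree ([[2 ,1 ,8] ,[6 ,0 ,3] ,[7]])
--     False
--     """
--     if type(t) is not list :
--         return False
--     n = len(t)
--     for e in t :
--         if not (type(e) is list) :
--              return False
--         if len(e) != n :
--              return False
--     return True
--
-- def appartient(e,t) :
--     """
--     ok = appartient(e,t)
--     True si e appartient à la liste carrée t,
--     False sinon
--     >>> t = [[2 ,1 ,8] ,[6 ,0 ,3] ,[7 ,5 ,4]]
--     >>> appartient (5,t)
--     True
--     >>> appartient (9,t)
--     False
--     """
--     assert listeCarree(t)
--     for elem in t :
--         if e in elem : return True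
--     return False
--
-- def Taquin (t) :
--     """
--     ok = Taquin (t)
--     True si la liste carrée t est un jeu de Taquin ,
--     False sinon .
--     >>> Taquin ([[0 ,1 ,2]])
--     False
--     >>> Taquin ([[3 ,1] ,[0 ,2]])
--     True
--     >>> Taquin ([[2 ,1 ,8] ,[6 ,0 ,3] ,[7 ,5 ,4]])
--     True
--     >>> Taquin ([[2 ,1 ,8] ,[6 ,0 ,3] ,[7 ,5 ,0]])
--     False
--     """
--     if not listeCarree (t) :
--         return False
--     n = len(t)
--     for i in range (n*n) :
--         if not appartient (i,t) :
--              return False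
--     return True
-- ===== SOURCE B (Python) =====
-- def Taquin(t):
--     if type(t) is not list:
--         return False
--     n = len(t)
--     if any(type(row) is not list or len(row) != n for row in t):
--         return False
--     flat = sorted(x for row in t for x in row)
--     return flat == list(range(n * n))
-- ===== Notes on version B (the rewrite author's own statement) =====
-- stated objective: alternative
-- what changed: Replaces the outer loop over range(n*n) with an inner membership scan of every row by a single flatten-and-sort followed by one linear comparison with list(range(n*n)).
import Mathlib
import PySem

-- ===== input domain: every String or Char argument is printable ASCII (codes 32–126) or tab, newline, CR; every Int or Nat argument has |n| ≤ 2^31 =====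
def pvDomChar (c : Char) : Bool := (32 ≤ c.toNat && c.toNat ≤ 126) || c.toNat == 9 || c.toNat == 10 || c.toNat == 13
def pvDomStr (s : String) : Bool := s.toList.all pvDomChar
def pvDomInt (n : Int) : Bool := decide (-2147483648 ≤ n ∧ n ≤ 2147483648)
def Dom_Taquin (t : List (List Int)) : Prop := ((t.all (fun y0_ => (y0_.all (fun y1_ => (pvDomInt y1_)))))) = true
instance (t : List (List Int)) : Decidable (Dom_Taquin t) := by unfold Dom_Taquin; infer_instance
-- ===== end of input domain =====

-- B replaces A's loop 'for each i in range(n*n), scan every row for i' by one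
-- flatten + sort + single comparison with range(n*n) (alternative algorithm; return value only).

-- ===== PORT A =====
-- helper listeCarree: loop with early returns over the rows ≡ List.all
def pyListeCarree (t : List (List Int)) : Bool :=
  t.all (fun e => e.length == t.length)

-- helper appartient: loop with early return over the rows ≡ List.any ('e in elem' is contains)
def pyAppartient (e : Int) (t : List (List Int)) : Bool :=
  t.any (fun elem => elem.contains e)

def Taquin (t : List (List Int)) : Bool :=
  if !pyListeCarree t then false
  else (PySem.List.pyRange 0 ((t.length * t.length : Nat) : Int)).all (fun i => pyAppartient i t)

-- ===== PORT B =====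
def Taquin_alt (t : List (List Int)) : Bool :=
  if t.any (fun row => row.length != t.length) then false
  else PySem.List.sorted (t.flatMap (fun row => row)) (fun x => x) ==
         PySem.List.pyRange 0 ((t.length * t.length : Nat) : Int)

-- ===== PRECONDITION & SPEC =====
def Spec_Taquin (t : List (List Int)) (out : Bool) : Prop := out = Taquin_alt t
instance (t : List (List Int)) (out : Bool) : Decidable (Spec_Taquin t out) := by unfold Spec_Taquin; infer_instance

-- ===== CLAIM (what is proved, stated in full; the proofs are below) =====
def Claim_equal_Taquin : Prop := ∀ (t : List (List Int)), Dom_Taquin t → Spec_Taquin t (Taquin t)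

-- ===== LEMMAS AND PROOFS =====

-- B's inline guard is the negation of A's listeCarree
theorem guard_eq (t : List (List Int)) :
    (t.any (fun row => row.length != t.length)) = !(pyListeCarree t) := by
  simp [pyListeCarree, List.all_eq_not_any_not, bne]

theorem flat_length' (n : Nat) (t : List (List Int)) (h : ∀ e ∈ t, e.length = n) :
    (t.flatMap (fun row => row)).length = t.length * n := by
  induction t with
  | nil => simp
  | cons x xs ih =>
    have hx := h x (by simp)
    have hxs := ih (fun e he => h e (by simp [he]))
    simp only [List.flatMap_cons, List.length_append, hx, hxs, List.length_cons]
    ring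

theorem flat_length (t : List (List Int)) (h : ∀ e ∈ t, e.length = t.length) :
    (t.flatMap (fun row => row)).length = t.length * t.length :=
  flat_length' t.length t h

theorem range_length (N : Nat) : (PySem.List.pyRange 0 (N : Int)).length = N := by
  rw [PySem.List.pyRange_zero_natCast]
  simp

theorem range_nodup (N : Nat) : (PySem.List.pyRange 0 (N : Int)).Nodup := by
  rw [PySem.List.pyRange_zero_natCast]
  exact List.nodup_range.map (fun a b h => by exact_mod_cast h)

theorem range_pairwise (N : Nat) :
    (PySem.List.pyRange 0 (N : Int)).Pairwise (fun a b => a < b) := by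
  rw [PySem.List.pyRange_zero_natCast, List.pairwise_map]
  exact (List.pairwise_lt_range (n := N)).imp (by intro a b h; exact_mod_cast h)

theorem main_eq (t : List (List Int)) (h : ∀ e ∈ t, e.length = t.length) :
    ((PySem.List.pyRange 0 ((t.length * t.length : Nat) : Int)).all (fun i => pyAppartient i t)) =
      (PySem.List.sorted (t.flatMap (fun row => row)) (fun x => x) ==
         PySem.List.pyRange 0 ((t.length * t.length : Nat) : Int)) := by
  have hlen : (t.flatMap (fun row => row)).length = t.length * t.length := flat_length t h
  by_cases hall : ∀ i ∈ PySem.List.pyRange 0 ((t.length * t.length : Nat) : Int),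
      ∃ row ∈ t, i ∈ row
  · have hsub : PySem.List.pyRange 0 ((t.length * t.length : Nat) : Int) ⊆
        t.flatMap (fun row => row) := by
      intro i hi
      obtain ⟨row, hrow, hmem⟩ := hall i hi
      exact List.mem_flatMap.mpr ⟨row, hrow, hmem⟩
    have hperm : (PySem.List.pyRange 0 ((t.length * t.length : Nat) : Int)).Perm
        (t.flatMap (fun row => row)) :=
      (List.subperm_of_subset (range_nodup _) hsub).perm_of_length_le
        (by rw [hlen, range_length])
    have hsorted : PySem.List.sorted (t.flatMap (fun row => row)) (fun x => x) =
        PySem.List.pyRange 0 ((t.length * t.length : Nat) : Int) :=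
      PySem.List.sorted_eq_of_perm_of_pairwise_lt _ _ (fun x => x) hperm (range_pairwise _)
    simp only [hsorted, beq_self_eq_true]
    rw [List.all_eq_true]
    intro i hi
    obtain ⟨row, hrow, hmem⟩ := hall i hi
    simp only [pyAppartient, List.any_eq_true, List.contains_iff_mem]
    exact ⟨row, hrow, by simpa using hmem⟩
  · push Not at hall
    obtain ⟨i, hiR, hinot⟩ := hall
    have hA : ((PySem.List.pyRange 0 ((t.length * t.length : Nat) : Int)).all
        (fun i => pyAppartient i t)) = false := by
      rw [Bool.eq_false_iff]
      intro hc
      rw [List.all_eq_true] at hc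
      have hi := hc i hiR
      simp only [pyAppartient, List.any_eq_true, List.contains_iff_mem] at hi
      obtain ⟨row, hrow, hmem⟩ := hi
      exact (hinot row hrow) (by simpa using hmem)
    have hB : (PySem.List.sorted (t.flatMap (fun row => row)) (fun x => x) ==
        PySem.List.pyRange 0 ((t.length * t.length : Nat) : Int)) = false := by
      rw [beq_eq_false_iff_ne]
      intro hc
      have hmem : i ∈ PySem.List.sorted (t.flatMap (fun row => row)) (fun x => x) :=
        hc ▸ hiR
      rw [PySem.List.mem_sorted, List.mem_flatMap] at hmem
      obtain ⟨row, hrow, hm⟩ := hmem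
      exact hinot row hrow hm
    rw [hA, hB]

-- ===== VERDICT (by name: the statement is the Claim_ definition above) =====
theorem Taquin_spec : Claim_equal_Taquin := by
  intro t _
  unfold Spec_Taquin Taquin Taquin_alt
  rw [guard_eq]
  by_cases hsq : pyListeCarree t
  · have h : ∀ e ∈ t, e.length = t.length := by
      intro e he
      have := (List.all_eq_true.mp hsq) e he
      simpa using this
    simp only [hsq, Bool.not_true, Bool.false_eq_true, if_false]
    exact main_eq t h
  · simp [hsq]
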